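-- pv_equiv track=rewrite | github.com/Dearyyyyy/TCG | data/3919/WA_py/512270.py | right_triangle
-- ===== SOURCE A (Python) =====
-- def right_triangle(edges_in):
--     """判断是否为直角三角形"""
--     flag_in = False
--     for i_in in range(len(edges_in)):
--         edges_in[i_in] = edges_in[i_in] ** 2
--
--     for edge_in in edges_in:
--         temp = edges_in[:]
--         temp.remove(edge_in)
--         if edge_in == sum(temp):
--             flag_in = True
--     return flag_in
-- ===== SOURCE B (Python) =====
-- def right_triangle(edges_in):
--     """判断是否为直角三角形"""
--     total = sum(e * e for e in edges_in)
--     return any(2 * e * e == total for e in edges_in)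
-- ===== Notes on version B (the rewrite author's own statement) =====
-- stated objective: faster
-- what changed: B precomputes the sum of squares once and checks 2*e*e == total in a single pass, instead of A's per-edge copy+remove+sum quadratic scan (B also does not mutate the input list, unlike A which squares it in place; equivalence is about the return value).
import Mathlib
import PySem

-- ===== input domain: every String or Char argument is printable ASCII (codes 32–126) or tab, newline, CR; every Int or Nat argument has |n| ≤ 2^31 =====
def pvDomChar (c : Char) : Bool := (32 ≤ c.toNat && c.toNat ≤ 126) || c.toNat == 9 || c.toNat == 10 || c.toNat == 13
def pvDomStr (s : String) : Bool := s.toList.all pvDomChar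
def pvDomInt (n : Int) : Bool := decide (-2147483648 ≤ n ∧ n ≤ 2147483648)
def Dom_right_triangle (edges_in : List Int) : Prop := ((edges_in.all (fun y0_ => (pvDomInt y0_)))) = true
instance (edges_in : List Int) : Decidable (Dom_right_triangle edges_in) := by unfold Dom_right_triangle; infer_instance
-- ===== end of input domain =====

-- B replaces A's per-edge copy+remove+sum scan by one precomputed sum of squares and a single
-- pass checking 2*e*e == total (return value only: A squares the input list in place, B does not mutate).

-- ===== PORT A =====
-- first loop: for i in range(len(edges_in)): edges_in[i] = edges_in[i] ** 2  (index always in range)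
def right_triangle (edges_in : List Int) : Bool :=
  let sq := (List.range edges_in.length).foldl
      (fun acc i => acc.set i ((acc.getD i 0) ^ 2)) edges_in
  -- second loop: temp = sq[:]; temp.remove(edge); if edge == sum(temp): flag = True
  sq.foldl (fun flag edge =>
      match PySem.List.remove? sq edge with
      | some temp => if edge == temp.sum then true else flag
      | none => flag) false

-- ===== PORT B =====
def right_triangle_alt (edges_in : List Int) : Bool :=
  let total := edges_in.foldl (fun s e => s + e * e) 0
  edges_in.any (fun e => 2 * e * e == total)

-- ===== PRECONDITION & SPEC =====
def Spec_right_triangle (edges_in : List Int) (out : Bool) : Prop := out = right_triangle_alt edges_in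
instance (edges_in : List Int) (out : Bool) : Decidable (Spec_right_triangle edges_in out) := by unfold Spec_right_triangle; infer_instance

-- ===== CLAIM (what is proved, stated in full; the proofs are below) =====
def Claim_equal_right_triangle : Prop := ∀ (edges_in : List Int), Dom_right_triangle edges_in → Spec_right_triangle edges_in (right_triangle edges_in)

-- ===== LEMMAS AND PROOFS =====

-- A's first loop is the in-place squaring map
theorem square_loop_eq (pre post : List Int) :
    (List.range' pre.length post.length).foldl
      (fun acc i => acc.set i ((acc.getD i 0) ^ 2)) (pre ++ post)
    = pre ++ post.map (· ^ 2) := by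
  induction post generalizing pre with
  | nil => simp
  | cons p rest ih =>
      simp only [List.length_cons]
      rw [List.range'_succ, List.foldl_cons]
      have hget : (pre ++ p :: rest).getD pre.length 0 = p := by
        simp [List.getD]
      have hset : (pre ++ p :: rest).set pre.length (p ^ 2) = (pre ++ [p ^ 2]) ++ rest := by
        rw [List.set_append_right _ _ (le_refl _)]
        simp
      have := ih (pre ++ [p ^ 2])
      simp only [List.length_append, List.length_cons] at this ⊢
      rw [hget, hset]
      simpa using this

theorem square_loop (l : List Int) :
    (List.range l.length).foldl (fun acc i => acc.set i ((acc.getD i 0) ^ 2)) l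
    = l.map (· ^ 2) := by
  have := square_loop_eq [] l
  simpa [List.range_eq_range'] using this

-- A's flag accumulator is an 'any'
theorem flag_foldl_any (l : List Int) (p : Int → Bool) (b : Bool) :
    l.foldl (fun flag x => if p x then true else flag) b = (b || l.any p) := by
  induction l generalizing b with
  | nil => simp
  | cons x xs ih =>
      rw [List.foldl_cons]
      by_cases h : p x
      · simp only [h, if_true]
        rw [ih]; simp [h]
      · simp only [h]
        rw [ih]; simp [h]

theorem foldl_sum_sq (l : List Int) (a : Int) :
    l.foldl (fun s e => s + e * e) a = a + (l.map (fun e => e * e)).sum := by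
  induction l generalizing a with
  | nil => simp
  | cons x xs ih => simp [ih, add_assoc]

theorem erase_sum (l : List Int) (a : Int) (h : a ∈ l) :
    (l.erase a).sum = l.sum - a := by
  have := (List.perm_cons_erase h).sum_eq
  simp at this
  omega

-- ===== VERDICT (by name: the statement is the Claim_ definition above) =====
theorem right_triangle_spec : Claim_equal_right_triangle := by
  intro edges_in _
  unfold Spec_right_triangle right_triangle right_triangle_alt
  rw [square_loop, foldl_sum_sq]
  set sq := edges_in.map (· ^ 2) with hsq
  have hbody : sq.foldl (fun flag edge =>
      match PySem.List.remove? sq edge with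
      | some temp => if edge == temp.sum then true else flag
      | none => flag) false
      = sq.foldl (fun flag edge => if edge == sq.sum - edge then true else flag) false := by
    apply PySem.List.foldl_congr_mem
    intro flag edge hmem
    simp only [PySem.List.remove?_eq_some_erase sq edge hmem, erase_sum sq edge hmem]
  rw [hbody, flag_foldl_any]
  have hsum : sq.sum = (edges_in.map (fun e => e * e)).sum := by
    rw [hsq]; congr 1; apply List.map_congr_left; intro x _; ring
  have hs : (edges_in.map (fun x => x ^ 2)).sum = (edges_in.map (fun e => e * e)).sum := by
    rw [← hsq]; exact hsum
  have hpt : ∀ e : Int, ((e ^ 2 : Int) == (edges_in.map (fun x => x ^ 2)).sum - e ^ 2)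
      = (2 * e * e == 0 + (edges_in.map (fun e => e * e)).sum) := by
    intro e
    rw [Bool.eq_iff_iff]
    simp only [beq_iff_eq, hs, zero_add]
    constructor <;> intro h <;> nlinarith [h]
  rw [hsq]
  simp only [Bool.false_or, List.any_map, Function.comp_def, hpt]
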